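-- pv_equiv track=rewrite | github.com/Simple2B/corbot.api | app/controllers/twitter.py | strip_spaces
-- ===== SOURCE A (Python) =====
-- def strip_spaces(temp_data):
--     spam_fried = False
--     stripped_string = ""
--     if len(temp_data) < 2:
--         return temp_data
--     for elem in temp_data[0: len(temp_data): 1]:
--         if ord(elem) > 32 and ord(elem) <= 125:
--             stripped_string = stripped_string + elem
--             spam_fried = False
--         elif ord(elem) == 32 and spam_fried == False:
--             stripped_string = stripped_string + " "
--             spam_fried = True
--     return stripped_string
-- ===== SOURCE B (Python) =====
-- def strip_spaces(temp_data):
--     if len(temp_data) < 2: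
--         return temp_data
--     f = [c for c in temp_data if 32 <= ord(c) <= 125]
--     if not f:
--         return ""
--     return f[0] + "".join(b for a, b in zip(f, f[1:]) if not (a == " " and b == " "))
-- ===== Notes on version B (the rewrite author's own statement) =====
-- stated objective: simpler
-- what changed: Replaced the fused single-pass state machine (flag for last-emitted-space, string concatenation in a loop) by two declarative passes: a comprehension filtering chars to codes 32..125, then a zip-with-shifted-list that drops a space whose predecessor in the filtered list is a space.
import Mathlib
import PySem

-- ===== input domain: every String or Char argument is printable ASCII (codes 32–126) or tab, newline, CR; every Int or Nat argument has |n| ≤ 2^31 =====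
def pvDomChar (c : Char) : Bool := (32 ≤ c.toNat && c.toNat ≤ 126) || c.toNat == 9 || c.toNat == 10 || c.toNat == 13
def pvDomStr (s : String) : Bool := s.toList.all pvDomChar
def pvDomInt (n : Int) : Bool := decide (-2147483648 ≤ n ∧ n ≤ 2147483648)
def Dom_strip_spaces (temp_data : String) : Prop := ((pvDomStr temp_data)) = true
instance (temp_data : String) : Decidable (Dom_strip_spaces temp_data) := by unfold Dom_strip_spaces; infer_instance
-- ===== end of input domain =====

-- B replaces A's fused state-machine loop by two declarative passes (filter, then
-- drop spaces whose predecessor is a space via zip with the shifted list); objective: simpler.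

-- ===== PORT A =====
-- loop body of A: (spam_fried, stripped_string) updated per elem
def pvStepA (st : Bool × List Char) (elem : Char) : Bool × List Char :=
  if 32 < elem.toNat ∧ elem.toNat ≤ 125 then (false, st.2 ++ [elem])
  else if elem.toNat = 32 ∧ st.1 = false then (true, st.2 ++ [' '])
  else st

def strip_spaces (temp_data : String) : String :=
  if (PySem.Str.len temp_data) < 2 then temp_data
  else
    -- temp_data[0 : len(temp_data) : 1] — step 1, so PySem.List.slice with those bounds
    String.ofList (((PySem.List.slice temp_data.toList (some 0)
      (some (PySem.Str.len temp_data))).foldl pvStepA (false, [])).2)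

-- ===== PORT B =====
def strip_spaces_alt (temp_data : String) : String :=
  if (PySem.Str.len temp_data) < 2 then temp_data
  else
    match temp_data.toList.filter (fun c => 32 ≤ c.toNat && c.toNat ≤ 125) with
    | [] => ""
    | h :: t =>
        String.ofList (h :: ((((h :: t).zip t).filter
          (fun p => !(p.1 == ' ' && p.2 == ' '))).map Prod.snd))

-- ===== PRECONDITION & SPEC =====
def Spec_strip_spaces (temp_data : String) (out : String) : Prop := out = strip_spaces_alt temp_data
instance (temp_data : String) (out : String) : Decidable (Spec_strip_spaces temp_data out) := by unfold Spec_strip_spaces; infer_instance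

-- ===== CLAIM (what is proved, stated in full; the proofs are below) =====
def Claim_equal_strip_spaces : Prop := ∀ (temp_data : String), Dom_strip_spaces temp_data → Spec_strip_spaces temp_data (strip_spaces temp_data)

-- ===== LEMMAS AND PROOFS =====

-- the output stream of A's state machine, as a function of the flag
def pvMach : Bool → List Char → List Char
  | _, [] => []
  | b, c :: cs =>
      if 32 < c.toNat ∧ c.toNat ≤ 125 then c :: pvMach false cs
      else if c.toNat = 32 ∧ b = false then ' ' :: pvMach true cs
      else pvMach b cs

theorem pvMach_space_true (cs : List Char) : pvMach true (' ' :: cs) = pvMach true cs := by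
  simp [pvMach]

theorem pvMach_space_false (cs : List Char) : pvMach false (' ' :: cs) = ' ' :: pvMach true cs := by
  simp [pvMach]

theorem pvMach_word (b : Bool) (c : Char) (cs : List Char) (h : 32 < c.toNat ∧ c.toNat ≤ 125) :
    pvMach b (c :: cs) = c :: pvMach false cs := by
  simp [pvMach, h]

theorem pvSpace_of_toNat (c : Char) (h : c.toNat = 32) : c = ' ' := by
  have h2 : c.val.toNat = (' ' : Char).val.toNat := h
  exact Char.ext (UInt32.toNat_inj.mp h2)

theorem pvFold_eq_mach (l : List Char) : ∀ (b : Bool) (acc : List Char),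
    (l.foldl pvStepA (b, acc)).2 = acc ++ pvMach b l := by
  induction l with
  | nil => intro b acc; simp [pvMach]
  | cons c cs ih =>
      intro b acc
      simp only [List.foldl_cons, pvMach, pvStepA]
      split_ifs with h1 h2
      · rw [ih]; simp
      · rw [ih]; simp
      · rw [ih]

theorem pvMach_filter (l : List Char) : ∀ (b : Bool),
    pvMach b l = pvMach b (l.filter (fun c => 32 ≤ c.toNat && c.toNat ≤ 125)) := by
  induction l with
  | nil => intro b; simp
  | cons c cs ih =>
      intro b
      by_cases hr : (32 ≤ c.toNat && c.toNat ≤ 125) = true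
      · simp only [List.filter_cons, hr, if_pos]
        by_cases hsp : c = ' '
        · subst hsp
          cases b
          · rw [pvMach_space_false, pvMach_space_false, ih]
          · rw [pvMach_space_true, pvMach_space_true, ih]
        · have hn : 32 ≤ c.toNat ∧ c.toNat ≤ 125 := by simpa using hr
          have hne : c.toNat ≠ 32 := fun hx => hsp (pvSpace_of_toNat c hx)
          have hw : 32 < c.toNat ∧ c.toNat ≤ 125 := ⟨by omega, hn.2⟩
          rw [pvMach_word b c _ hw, pvMach_word b c _ hw, ih]
      · have hn : ¬ (32 ≤ c.toNat ∧ c.toNat ≤ 125) := by simpa using hr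
        have h1 : ¬ (32 < c.toNat ∧ c.toNat ≤ 125) := by omega
        have h2 : ¬ (c.toNat = 32 ∧ b = false) := by
          rintro ⟨h, _⟩; exact hn ⟨by omega, by omega⟩
        simp only [List.filter_cons, hr]
        simp only [pvMach, h1, h2, if_false]
        exact ih b

theorem pvMach_zip (t : List Char) : ∀ (prev : Char),
    (∀ c ∈ t, 32 ≤ c.toNat ∧ c.toNat ≤ 125) →
    pvMach (prev == ' ') t
      = (((prev :: t).zip t).filter (fun p => !(p.1 == ' ' && p.2 == ' '))).map Prod.snd := by
  induction t with
  | nil => intro prev _; simp [pvMach]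
  | cons c cs ih =>
      intro prev hall
      have hc := hall c (List.mem_cons_self ..)
      have hrest : ∀ x ∈ cs, 32 ≤ x.toNat ∧ x.toNat ≤ 125 :=
        fun x hx => hall x (List.mem_cons_of_mem _ hx)
      by_cases hsp : c = ' '
      · subst hsp
        have ihs := ih ' ' hrest
        simp only [beq_self_eq_true] at ihs
        by_cases hp : prev = ' '
        · subst hp
          simp only [beq_self_eq_true]
          rw [pvMach_space_true, ihs]
          simp [List.zip_cons_cons]
        · have hpb : (prev == ' ') = false := beq_eq_false_iff_ne.mpr hp
          rw [hpb, pvMach_space_false, ihs]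
          simp [List.zip_cons_cons, hpb]
      · have hne : c.toNat ≠ 32 := fun hx => hsp (pvSpace_of_toNat c hx)
        have hw : 32 < c.toNat ∧ c.toNat ≤ 125 := ⟨by omega, hc.2⟩
        have hcb : (c == ' ') = false := beq_eq_false_iff_ne.mpr hsp
        have ihs := ih c hrest
        rw [hcb] at ihs
        rw [pvMach_word _ _ _ hw, ihs]
        simp [List.zip_cons_cons, hcb]

theorem pvMach_head (h : Char) (t : List Char)
    (hh : 32 ≤ h.toNat ∧ h.toNat ≤ 125) :
    pvMach false (h :: t) = h :: pvMach (h == ' ') t := by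
  by_cases hsp : h = ' '
  · subst hsp
    rw [pvMach_space_false]
    simp only [beq_self_eq_true]
  · have hne : h.toNat ≠ 32 := fun hx => hsp (pvSpace_of_toNat h hx)
    have hw : 32 < h.toNat ∧ h.toNat ≤ 125 := ⟨by omega, hh.2⟩
    have hcb : (h == ' ') = false := beq_eq_false_iff_ne.mpr hsp
    rw [pvMach_word _ _ _ hw, hcb]

-- ===== VERDICT (by name: the statement is the Claim_ definition above) =====
theorem strip_spaces_spec : Claim_equal_strip_spaces := by
  intro s _
  unfold Spec_strip_spaces strip_spaces strip_spaces_alt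
  by_cases hlen : (PySem.Str.len s) < 2
  · simp only [if_pos hlen]
  · simp only [if_neg hlen]
    have h0 : (0 : Int) ≤ PySem.Str.len s := by simp [PySem.Str.len_eq]
    have hslice : PySem.List.slice s.toList (some 0) (some (PySem.Str.len s)) = s.toList := by
      rw [PySem.List.slice_zero_start, PySem.List.slice_to _ h0]
      simp [PySem.Str.len_eq]
    rw [hslice, pvFold_eq_mach, List.nil_append, pvMach_filter]
    cases hf : s.toList.filter (fun c => 32 ≤ c.toNat && c.toNat ≤ 125) with
    | nil => rfl
    | cons h t =>
        have hmem : ∀ c ∈ h :: t, 32 ≤ c.toNat ∧ c.toNat ≤ 125 := by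
          intro c hc
          have := List.of_mem_filter (hf ▸ hc)
          simpa using this
        rw [pvMach_head h t (hmem h (List.mem_cons_self ..)),
          pvMach_zip t h (fun c hc => hmem c (List.mem_cons_of_mem _ hc))]
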